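-- pv_equiv track=rewrite | github.com/Qiskit/qiskit | qiskit/tools/visualization.py | total_2_register_index
-- ===== SOURCE A (Python) =====
-- def total_2_register_index(index, registers):
--     """Get register name for qubit index.
--
--     This function uses the self.qregs ordered dictionary, which looks like
--     {'qr1': 2, 'qr2', 3}
--     to get the register name for the total qubit index. For the above example,
--     index in [0,1] returns 'qr1' and index in [2,4] returns 'qr2'.
--
--     Args:
--         index (int): total qubit index among all quantum registers
--         registers (OrderedDict): OrderedDict as described above.
--     Returns:
--         str: name of register associated with qubit index.
--     Raises:
--         ValueError: if the qubit index lies outside the range of qubit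
--             registers.
--     """
--     count = 0
--     for name, size in registers.items():
--         if count + size > index:
--             return name, index - count
--         else:
--             count += size
--     raise ValueError('qubit index lies outside range of qubit registers')
-- ===== SOURCE B (Python) =====
-- def total_2_register_index(index, registers):
--     """Get register name for qubit index.
--
--     Table-build-then-search: materialize names, sizes and the prefix-sum
--     table of the sizes, find the first cumulative value strictly greater
--     than index, and recover the offset arithmetically from the table.
--     """
--     names = list(registers.keys())
--     sizes = list(registers.values())
--     cums = []
--     total = 0
--     for s in sizes:
--         total += s
--         cums.append(total)
--     for pos, c in enumerate(cums):
--         if c > index: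
--             return names[pos], index - (c - sizes[pos])
--     raise ValueError('qubit index lies outside range of qubit registers')
-- ===== Notes on version B (the rewrite author's own statement) =====
-- stated objective: alternative
-- what changed: A keeps a running count and returns inside a single items() loop; B first materializes names/sizes and a prefix-sum table, then searches that table for the first cumulative value exceeding index and recovers the offset arithmetically from the table entry.
import Mathlib
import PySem

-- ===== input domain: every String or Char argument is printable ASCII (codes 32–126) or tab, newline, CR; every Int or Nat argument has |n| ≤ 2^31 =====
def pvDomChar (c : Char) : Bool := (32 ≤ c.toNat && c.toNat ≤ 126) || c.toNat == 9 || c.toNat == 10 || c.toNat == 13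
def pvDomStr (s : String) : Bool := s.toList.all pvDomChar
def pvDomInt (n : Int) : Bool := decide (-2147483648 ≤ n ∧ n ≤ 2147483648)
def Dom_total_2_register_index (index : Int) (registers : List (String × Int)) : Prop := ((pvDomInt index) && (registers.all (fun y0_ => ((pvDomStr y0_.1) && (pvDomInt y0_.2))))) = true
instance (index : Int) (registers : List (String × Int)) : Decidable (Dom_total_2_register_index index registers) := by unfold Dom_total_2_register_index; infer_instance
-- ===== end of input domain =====

-- B replaces A's running-count loop by a prefix-sum table plus a search over that
-- table, recovering the offset arithmetically (objective: alternative decomposition).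


-- ===== PORT A =====
-- A's loop: running count, early return at the first register with count + size > index.
-- The fall-through (Python: raise ValueError) is outside Pre_; the port returns ("", 0) there.
def pvAGo (index : Int) (count : Int) : List (String × Int) → String × Int
  | [] => ("", 0)
  | (name, size) :: rest =>
      if count + size > index then (name, index - count) else pvAGo index (count + size) rest

def total_2_register_index (index : Int) (registers : List (String × Int)) : String × Int :=
  pvAGo index 0 registers

-- ===== PORT B =====
-- prefix-sum table of the sizes (B's first loop, accumulator `total`)
def pvBCums (total : Int) : List Int → List Int
  | [] => []
  | s :: rest => (total + s) :: pvBCums (total + s) rest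

-- B's second loop: walk names/sizes/cums in parallel (enumerate(cums) with names[pos],
-- sizes[pos] lookups), return at the first cum > index; fall-through = raise, outside Pre_.
def pvBSearch (index : Int) : List String → List Int → List Int → String × Int
  | name :: ns, size :: ss, c :: cs =>
      if c > index then (name, index - (c - size)) else pvBSearch index ns ss cs
  | _, _, _ => ("", 0)

def total_2_register_index_alt (index : Int) (registers : List (String × Int)) : String × Int :=
  pvBSearch index (registers.map Prod.fst) (registers.map Prod.snd)
    (pvBCums 0 (registers.map Prod.snd))

-- ===== PRECONDITION & SPEC =====
-- Pre_ excludes exactly the inputs where Python A raises ValueError: those where no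
-- prefix of the sizes sums to more than index.
def Pre_total_2_register_index (index : Int) (registers : List (String × Int)) : Prop :=
  ∃ n ∈ List.range registers.length, ((registers.take (n + 1)).map Prod.snd).sum > index

instance (index : Int) (registers : List (String × Int)) : Decidable (Pre_total_2_register_index index registers) := by unfold Pre_total_2_register_index; infer_instance

def pvWitness_total_2_register_index : Int × (List (String × Int)) := (2, [("qr1", 2), ("qr2", 3)])

def Spec_total_2_register_index (index : Int) (registers : List (String × Int)) (out : String × Int) : Prop := out = total_2_register_index_alt index registers
instance (index : Int) (registers : List (String × Int)) (out : String × Int) : Decidable (Spec_total_2_register_index index registers out) := by unfold Spec_total_2_register_index; infer_instance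

-- ===== CLAIM (what is proved, stated in full; the proofs are below) =====
def Claim_equal_total_2_register_index : Prop := ∀ (index : Int) (registers : List (String × Int)), Dom_total_2_register_index index registers → Pre_total_2_register_index index registers → Spec_total_2_register_index index registers (total_2_register_index index registers)

-- ===== LEMMAS AND PROOFS =====

-- A's running count at step i equals the prefix sum c - size stored in B's table:
-- the two loops agree for every starting accumulator (in fact on all inputs).
theorem pvGo_eq (index : Int) :
    ∀ (regs : List (String × Int)) (count : Int),
      pvAGo index count regs =
        pvBSearch index (regs.map Prod.fst) (regs.map Prod.snd)
          (pvBCums count (regs.map Prod.snd)) := by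
  intro regs
  induction regs with
  | nil => intro count; rfl
  | cons p rest ih =>
      intro count
      obtain ⟨name, size⟩ := p
      simp only [pvAGo, List.map_cons, pvBCums, pvBSearch]
      have harith : index - (count + size - size) = index - count := by ring
      rw [harith]
      split
      · rfl
      · exact ih (count + size)

-- ===== VERDICT (by name: the statement is the Claim_ definition above) =====
theorem total_2_register_index_spec : Claim_equal_total_2_register_index := by
  intro index registers _ _
  show total_2_register_index index registers = total_2_register_index_alt index registers
  exact pvGo_eq index registers 0
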